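-- pv_equiv track=rewrite | github.com/levietquang230996/api_thiet_bi_may_cat | api/main.py | generate_backoff_strategy
-- ===== SOURCE A (Python) =====
-- from typing import Dict, List, Tuple, Union, Optional, Any
--
-- def generate_backoff_strategy(input_cols: List[str]) -> List[List[str]]:
--     """
--     Generate backoff strategy based on input columns.
--     Creates all possible subsets of input_cols in order of decreasing size.
--     """
--     from itertools import combinations
--
--     n = len(input_cols)
--     backoffs = []
--
--     # Add all subsets from size n down to 0
--     for r in range(n, -1, -1):
--         if r == 0:
--             backoffs.append([])  # Global fallback
--         else:
--             # Add all combinations of size r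
--             for combo in combinations(input_cols, r):
--                 backoffs.append(list(combo))
--
--     return backoffs
-- ===== SOURCE B (Python) =====
-- def generate_backoff_strategy(input_cols):
--     """Build the full powerset in one pass, then emit subsets by decreasing size."""
--     subsets = [[]]
--     for x in reversed(input_cols):
--         subsets = [[x] + s for s in subsets] + subsets
--     n = len(input_cols)
--     return [s for r in range(n, -1, -1) for s in subsets if len(s) == r]
-- ===== Notes on version B (the rewrite author's own statement) =====
-- stated objective: alternative
-- what changed: Replaces the per-size itertools.combinations loops by building the full powerset once with a fold and then emitting the subsets grouped by decreasing length.
import Mathlib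
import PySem

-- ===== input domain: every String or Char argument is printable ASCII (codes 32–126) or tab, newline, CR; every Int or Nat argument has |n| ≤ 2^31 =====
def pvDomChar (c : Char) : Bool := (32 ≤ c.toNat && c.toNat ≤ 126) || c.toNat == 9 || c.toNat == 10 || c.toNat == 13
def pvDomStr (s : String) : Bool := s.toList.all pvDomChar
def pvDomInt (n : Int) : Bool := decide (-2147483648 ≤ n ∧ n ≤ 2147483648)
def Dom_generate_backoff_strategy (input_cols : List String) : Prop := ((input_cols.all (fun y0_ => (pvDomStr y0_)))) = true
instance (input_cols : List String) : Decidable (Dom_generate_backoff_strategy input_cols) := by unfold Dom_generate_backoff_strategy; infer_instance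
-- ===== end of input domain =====

-- B builds the powerset once with a fold and groups it by decreasing length;
-- A runs itertools.combinations for each size. Same output, alternative decomposition.

-- ===== PORT A =====
-- itertools.combinations(xs, r) returning lists, in itertools' order
def combosA (r : Nat) (xs : List String) : List (List String) :=
  match r, xs with
  | 0, _ => [[]]
  | _ + 1, [] => []
  | r + 1, x :: xs' => (combosA r xs').map (fun c => x :: c) ++ combosA (r + 1) xs'

def generate_backoff_strategy (input_cols : List String) : List (List String) :=
  let n : Int := input_cols.length
  (PySem.List.pyRange n (-1) (-1)).foldl
    (fun backoffs r =>
      if r = 0 then backoffs ++ [[]]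
      else backoffs ++ combosA r.toNat input_cols) []

-- ===== PORT B =====
-- subsets = [[]]; for x in reversed(input_cols): subsets = [[x]+s for s in subsets] + subsets
def powB (input_cols : List String) : List (List String) :=
  input_cols.foldr (fun x subsets => subsets.map (fun s => x :: s) ++ subsets) [[]]

def generate_backoff_strategy_alt (input_cols : List String) : List (List String) :=
  let subsets := powB input_cols
  let n : Int := input_cols.length
  (PySem.List.pyRange n (-1) (-1)).flatMap
    (fun r => subsets.filter (fun s => (s.length : Int) = r))

-- ===== PRECONDITION & SPEC =====
def Spec_generate_backoff_strategy (input_cols : List String) (out : List (List String)) : Prop := out = generate_backoff_strategy_alt input_cols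
instance (input_cols : List String) (out : List (List String)) : Decidable (Spec_generate_backoff_strategy input_cols out) := by unfold Spec_generate_backoff_strategy; infer_instance

-- ===== CLAIM (what is proved, stated in full; the proofs are below) =====
def Claim_equal_generate_backoff_strategy : Prop := ∀ (input_cols : List String), Dom_generate_backoff_strategy input_cols → Spec_generate_backoff_strategy input_cols (generate_backoff_strategy input_cols)

-- ===== LEMMAS AND PROOFS =====

-- the length-k slice of B's powerset, in order, is exactly itertools.combinations of size k
theorem filter_powB (xs : List String) (k : Nat) :
    (powB xs).filter (fun s => s.length = k) = combosA k xs := by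
  induction xs generalizing k with
  | nil => cases k <;> simp [powB, combosA]
  | cons x xs ih =>
    have hpow : powB (x :: xs) = (powB xs).map (fun s => x :: s) ++ powB xs := rfl
    rw [hpow, List.filter_append, List.filter_map]
    cases k with
    | zero =>
      have h1 : List.filter ((fun s => decide (s.length = 0)) ∘ fun s => x :: s) (powB xs)
          = [] := by simp [Function.comp]
      rw [h1]
      simpa [combosA] using ih 0
    | succ k =>
      have h1 : List.filter ((fun s => decide (s.length = k + 1)) ∘ fun s => x :: s) (powB xs)
          = List.filter (fun s => decide (s.length = k)) (powB xs) := by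
        apply List.filter_congr
        intro s _
        simp
      rw [h1, ih k, ih (k + 1)]
      simp [combosA]

theorem generate_backoff_strategy_spec : Claim_equal_generate_backoff_strategy := by
  intro input_cols _
  unfold Spec_generate_backoff_strategy generate_backoff_strategy generate_backoff_strategy_alt
  have hfun : (fun (backoffs : List (List String)) (r : Int) =>
      if r = 0 then backoffs ++ [([] : List String)]
      else backoffs ++ combosA r.toNat input_cols)
      = (fun backoffs r => backoffs ++ (if r = 0 then [[]] else combosA r.toNat input_cols)) := by
    funext b r; split <;> rfl
  rw [hfun, PySem.List.foldl_append_eq_flatMap, List.nil_append]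
  apply List.flatMap_congr
  intro r hr
  have h0 : (0:Int) ≤ r := by
    have := (PySem.List.mem_pyRange_neg_one.mp hr).1
    omega
  have hfilt : (powB input_cols).filter (fun s => decide ((s.length : Int) = r))
      = (powB input_cols).filter (fun s => s.length = r.toNat) := by
    apply List.filter_congr
    intro s _
    simp only [decide_eq_decide]
    omega
  rw [hfilt, filter_powB]
  split
  · next h => subst h; simp [combosA]
  · rfl
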